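-- pv_equiv track=rewrite | github.com/luciferchase/advent-of-code | 2020/python/day-06.py | part_2
-- ===== SOURCE A (Python) =====
-- def part_2(groups):
--     count = 0
--     for group in groups:
--         answers = "".join(group)
--         answers_checked = ""
--         for question in answers:
--             if (answers.count(question) == len(group) and question not in answers_checked):
--                 answers_checked += question
--                 count += 1
--     return count
-- ===== SOURCE B (Python) =====
-- def part_2(groups):
--     total = 0
--     for group in groups:
--         n = len(group)
--         prev = None
--         run = 0
--         for c in sorted("".join(group)):
--             if c == prev:
--                 run += 1
--             else:
--                 if run == n:
--                     total += 1
--                 prev = c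
--                 run = 1
--         if prev is not None and run == n:
--             total += 1
--     return total
-- ===== Notes on version B (the rewrite author's own statement) =====
-- stated objective: faster
-- what changed: Replaces A's per-character rescans of the joined string (answers.count(q) plus membership in a growing answers_checked string) with sort-then-single-scan: sort the group's joined answers once, then one linear pass over consecutive equal-character runs, counting each run whose length equals the group size.
import Mathlib
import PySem

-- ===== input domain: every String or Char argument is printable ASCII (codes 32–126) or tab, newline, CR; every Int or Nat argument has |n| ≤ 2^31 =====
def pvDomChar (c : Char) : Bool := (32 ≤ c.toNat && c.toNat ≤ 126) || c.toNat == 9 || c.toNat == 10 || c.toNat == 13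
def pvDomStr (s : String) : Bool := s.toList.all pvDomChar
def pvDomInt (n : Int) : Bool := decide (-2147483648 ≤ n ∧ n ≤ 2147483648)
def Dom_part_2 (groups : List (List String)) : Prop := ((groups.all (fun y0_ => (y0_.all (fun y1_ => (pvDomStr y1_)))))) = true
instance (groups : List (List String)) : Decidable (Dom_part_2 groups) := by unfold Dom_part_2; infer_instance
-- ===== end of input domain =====

-- B sorts each group's joined answers once and counts, in a single linear scan, the runs of equal characters whose length equals the group size (asymptotically faster than A's per-character rescans).


-- ===== PORT A =====
-- `answers.count(question)` / `question not in answers_checked` act on length-1 strings,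
-- so they are exactly char count / char membership on the char list.
def part_2 (groups : List (List String)) : Int :=
  groups.foldl (fun count group =>
    let answers := (PySem.Str.join "" group).toList
    (answers.foldl (fun st question =>
        if answers.count question == group.length && !(st.1.contains question) then
          (st.1 ++ [question], st.2 + 1)
        else st)
      (([] : List Char), count)).2) 0

-- ===== PORT B =====
-- the loop body of Source B: `if c == prev: run += 1 else: (flush if run == n; prev, run = c, 1)`
def pvStepB (n : Int) (st : Option Char × Int × Int) (c : Char) : Option Char × Int × Int :=
  if some c == st.1 then (st.1, st.2.1 + 1, st.2.2)
  else (some c, 1, st.2.2 + (if st.2.1 == n then 1 else 0))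

-- the final flush of Source B: `if prev is not None and run == n: total += 1`
def pvFin (n : Int) (st : Option Char × Int × Int) : Int :=
  if st.1.isSome && st.2.1 == n then st.2.2 + 1 else st.2.2

def part_2_alt (groups : List (List String)) : Int :=
  groups.foldl (fun total group =>
    let n : Int := (group.length : Int)
    pvFin n ((PySem.List.sorted ((PySem.Str.join "" group).toList) (fun x => x) false).foldl
      (pvStepB n) (none, 0, total))) 0

-- ===== PRECONDITION & SPEC =====
def Spec_part_2 (groups : List (List String)) (out : Int) : Prop := out = part_2_alt groups
instance (groups : List (List String)) (out : Int) : Decidable (Spec_part_2 groups out) := by unfold Spec_part_2; infer_instance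

-- ===== CLAIM (what is proved, stated in full; the proofs are below) =====
def Claim_equal_part_2 : Prop := ∀ (groups : List (List String)), Dom_part_2 groups → Spec_part_2 groups (part_2 groups)

-- ===== LEMMAS AND PROOFS =====

-- "".join(group) as a flat char list
lemma pv_join_chars (group : List String) :
    (PySem.Str.join "" group).toList = (group.map String.toList).flatten := by
  simp only [PySem.Str.toList_join, PySem.Chars.join, String.toList_empty, List.intercalate]
  induction group with
  | nil => rfl
  | cons x t ih =>
    cases t with
    | nil => rfl
    | cons y u => simp_all

-- A's inner loop counts the distinct characters of s with total count n not yet in checked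
lemma pv_loopA (s : List Char) (n : Nat) :
    ∀ (l : List Char) (checked : List Char) (cnt : Int),
    (l.foldl (fun st q =>
        if s.count q == n && !(st.1.contains q) then (st.1 ++ [q], st.2 + 1) else st)
      (checked, cnt)).2
    = cnt + ((l.toFinset.filter (fun c => s.count c = n ∧ c ∉ checked)).card : Int) := by
  intro l
  induction l with
  | nil => intro checked cnt; simp
  | cons c t ih =>
    intro checked cnt
    by_cases hP : s.count c = n ∧ c ∉ checked
    · have hb : (s.count c == n && !(checked.contains c)) = true := by
        simp [hP.1, hP.2]
      simp only [List.foldl_cons, hb, if_true]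
      rw [ih]
      have hfilt : (t.toFinset.filter (fun c' => s.count c' = n ∧ c' ∉ checked ++ [c]))
          = ((insert c t.toFinset).filter (fun c' => s.count c' = n ∧ c' ∉ checked)).erase c := by
        ext x
        by_cases hx : x = c
        · subst hx; simp
        · simp [hx, List.mem_append]
      rw [hfilt]
      have hmem : c ∈ (insert c t.toFinset).filter (fun c' => s.count c' = n ∧ c' ∉ checked) := by
        simp [hP.1, hP.2]
      have := Finset.card_erase_add_one hmem
      simp only [List.toFinset_cons]
      omega
    · have hb : (s.count c == n && !(checked.contains c)) = false := by
        by_cases h1 : s.count c = n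
        · have h2 : c ∈ checked := by
            by_contra h; exact hP ⟨h1, h⟩
          simp [h2]
        · simp [h1]
      simp only [List.foldl_cons, hb, Bool.false_eq_true, if_false]
      rw [ih]
      have : (insert c t.toFinset).filter (fun c' => s.count c' = n ∧ c' ∉ checked)
          = t.toFinset.filter (fun c' => s.count c' = n ∧ c' ∉ checked) := by
        rw [Finset.filter_insert, if_neg hP]
      simp [List.toFinset_cons, this]

-- a sorted list with head-lower-bound d splits as replicate (count d) d ++ rest with d ∉ rest
lemma pv_run_decomp : ∀ (t : List Char) (d : Char), (∀ x ∈ t, d ≤ x) → t.Pairwise (· ≤ ·) →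
    ∃ (k : Nat) (rest : List Char), t = List.replicate k d ++ rest ∧ rest.Pairwise (· ≤ ·) ∧
      d ∉ rest ∧ t.count d = k := by
  intro t
  induction t with
  | nil => intro d _ _; exact ⟨0, [], rfl, List.Pairwise.nil, by simp, by simp⟩
  | cons x t' ih =>
    intro d hle hp
    by_cases hx : x = d
    · subst hx
      obtain ⟨hxy, hp'⟩ := List.pairwise_cons.mp hp
      obtain ⟨k, rest, hEq, hrp, hdn, hcnt⟩ := ih x (fun y hy => hxy y hy) hp'
      refine ⟨k + 1, rest, ?_, hrp, hdn, ?_⟩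
      · simp [List.replicate_succ, hEq]
      · simp [hcnt]
    · have hdx : d < x := lt_of_le_of_ne (hle x (by simp)) (fun h => hx h.symm)
      refine ⟨0, x :: t', by simp, hp, ?_, ?_⟩
      · obtain ⟨hxy, _⟩ := List.pairwise_cons.mp hp
        intro hmem
        rcases List.mem_cons.mp hmem with h | h
        · exact hx h.symm
        · exact absurd (hdx.trans_le (hxy d h)) (lt_irrefl d)
      · rw [List.count_eq_zero]
        intro hmem
        rcases List.mem_cons.mp hmem with h | h
        · exact hx h.symm
        · obtain ⟨hxy, _⟩ := List.pairwise_cons.mp hp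
          exact absurd (hdx.trans_le (hxy d h)) (lt_irrefl d)

-- run absorption: scanning a run of c from state (some c, r, tot) just lengthens the run
lemma pv_stepB_replicate (n : Int) (c : Char) : ∀ (k : Nat) (r tot : Int),
    (List.replicate k c).foldl (pvStepB n) (some c, r, tot) = (some c, r + (k : Int), tot) := by
  intro k
  induction k with
  | zero => intro r tot; simp
  | succ k ih =>
    intro r tot
    rw [List.replicate_succ, List.foldl_cons]
    have hstep : pvStepB n (some c, r, tot) c = (some c, r + 1, tot) := by
      simp [pvStepB]
    rw [hstep, ih]
    simp only [Prod.mk.injEq, and_true, true_and]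
    push_cast; ring

-- splitting off the first run of a distinct-character count
lemma pv_D_cons (n : Int) (d : Char) (k : Nat) (rest : List Char) (hd : d ∉ rest) :
    ((((d :: (List.replicate k d ++ rest)).toFinset.filter
        (fun x => ((d :: (List.replicate k d ++ rest)).count x : Int) = n)).card : Int))
    = (if ((k : Int) + 1) = n then 1 else 0)
      + ((rest.toFinset.filter (fun x => (rest.count x : Int) = n)).card : Int) := by
  set l := d :: (List.replicate k d ++ rest) with hl
  have htf : l.toFinset = insert d rest.toFinset := by
    ext x
    simp [hl, List.mem_replicate]
    tauto
  have hcd : l.count d = k + 1 := by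
    have : rest.count d = 0 := List.count_eq_zero.mpr hd
    simp [hl, List.count_append, this]
  have hcx : ∀ x, x ≠ d → l.count x = rest.count x := by
    intro x hx
    simp [hl, List.count_append, List.count_replicate, Ne.symm hx]
  rw [htf, Finset.filter_insert]
  have hfc : rest.toFinset.filter (fun x => (l.count x : Int) = n)
      = rest.toFinset.filter (fun x => (rest.count x : Int) = n) := by
    apply Finset.filter_congr
    intro x hx
    have hxd : x ≠ d := fun h => hd (by rw [← h]; exact List.mem_toFinset.mp hx)
    simp [hcx x hxd]
  by_cases hPd : ((l.count d : Int) = n)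
  · rw [if_pos hPd, hfc]
    have hdnm : d ∉ rest.toFinset.filter (fun x => (rest.count x : Int) = n) := by
      simp [hd]
    rw [Finset.card_insert_of_notMem hdnm]
    have : ((k : Int) + 1) = n := by
      rw [hcd] at hPd; push_cast at hPd; linarith
    rw [if_pos this]
    push_cast; ring
  · rw [if_neg hPd, hfc]
    have : ¬ (((k : Int) + 1) = n) := by
      intro h; apply hPd; rw [hcd]; push_cast; linarith
    rw [if_neg this]
    ring

-- B's scan over a sorted list, from a state whose remembered char does not occur in the list,
-- finalizes to tot + (pending-run flush) + (number of distinct chars with total count n)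
lemma pv_scanB (n : Int) : ∀ (N : Nat) (l : List Char), l.length ≤ N → l.Pairwise (· ≤ ·) →
    ∀ (p : Option Char), (∀ x ∈ l, p ≠ some x) → ∀ (r tot : Int),
    (l ≠ [] → p = none → r ≠ n) →
    pvFin n (l.foldl (pvStepB n) (p, r, tot))
    = tot + (if p.isSome && r == n then 1 else 0)
      + ((l.toFinset.filter (fun x => (l.count x : Int) = n)).card : Int) := by
  intro N
  induction N with
  | zero =>
    intro l hlen _ p _ r tot _
    have hl : l = [] := List.eq_nil_of_length_eq_zero (Nat.le_zero.mp hlen)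
    subst hl
    simp only [List.foldl_nil, pvFin, List.toFinset_nil, Finset.filter_empty,
      Finset.card_empty, Nat.cast_zero, add_zero]
    split_ifs <;> omega
  | succ N ih =>
    intro l hlen hp p hnp r tot hpr
    cases l with
    | nil =>
      simp only [List.foldl_nil, pvFin, List.toFinset_nil, Finset.filter_empty,
        Finset.card_empty, Nat.cast_zero, add_zero]
      split_ifs <;> omega
    | cons d t =>
      obtain ⟨hdle, htp⟩ := List.pairwise_cons.mp hp
      obtain ⟨k, rest, htEq, hrp, hdn, hcnt⟩ := pv_run_decomp t d hdle htp
      -- the first character flushes (possibly trivially) and starts a run of d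
      have hne : (some d == p) = false := by
        have : p ≠ some d := hnp d (by simp)
        cases p with
        | none => rfl
        | some q =>
          simp only [beq_eq_false_iff_ne, ne_eq, Option.some.injEq]
          exact fun h => this (by rw [h])
      have hflush : (if r == n then (1:Int) else 0) = (if p.isSome && r == n then 1 else 0) := by
        cases p with
        | none =>
          have hrn : r ≠ n := hpr (by simp) rfl
          simp [hrn]
        | some q => simp
      have hstep1 : pvStepB n (p, r, tot) d
          = (some d, 1, tot + (if p.isSome && r == n then 1 else 0)) := by
        simp only [pvStepB, hne, Bool.false_eq_true, if_false]
        rw [hflush]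
      rw [List.foldl_cons, hstep1, htEq, List.foldl_append, pv_stepB_replicate]
      have hlen' : rest.length ≤ N := by
        have := hlen
        simp only [htEq, List.length_cons, List.length_append, List.length_replicate] at this
        omega
      rw [ih rest hlen' hrp (some d) (fun x hx h => hdn (by rw [Option.some.injEq] at h; rw [h]; exact hx))
        (1 + (k : Int)) (tot + (if p.isSome && r == n then 1 else 0)) (by simp)]
      have hD := pv_D_cons n d k rest hdn
      rw [← htEq] at hD ⊢
      rw [hD]
      by_cases hkn : ((k : Int) + 1) = n
      · have h1 : ((1 + (k : Int)) == n) = true := by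
          simp; omega
        rw [if_pos hkn]
        simp only [Option.isSome_some, Bool.true_and, h1, if_true]
        ring
      · have h1 : ((1 + (k : Int)) == n) = false := by
          simp; omega
        rw [if_neg hkn]
        simp only [Option.isSome_some, Bool.true_and, h1, Bool.false_eq_true, if_false]
        ring

-- per-group value of B equals the number of distinct characters with total count = group size
lemma pv_groupB (group : List String) (total : Int) :
    pvFin (group.length : Int)
      ((PySem.List.sorted ((PySem.Str.join "" group).toList) (fun x => x) false).foldl
        (pvStepB (group.length : Int)) (none, 0, total))
    = total + ((((PySem.Str.join "" group).toList).toFinset.filter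
        (fun c => ((PySem.Str.join "" group).toList).count c = group.length)).card : Int) := by
  set s := (PySem.Str.join "" group).toList with hs
  set t := PySem.List.sorted s (fun x => x) false with ht
  have hperm : t.Perm s := PySem.List.sorted_perm s (fun x => x) false
  have hpw : t.Pairwise (· ≤ ·) := by
    have := PySem.List.sorted_pairwise s (fun x => x)
    simpa using this
  have hpr : t ≠ [] → (none : Option Char) = none → (0 : Int) ≠ (group.length : Int) := by
    intro htne _ h0
    have hg0 : group.length = 0 := by exact_mod_cast h0.symm
    have hgnil : group = [] := List.eq_nil_of_length_eq_zero hg0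
    apply htne
    have hsnil : s = [] := by
      rw [hs, pv_join_chars, hgnil]; rfl
    have : t.length = 0 := by
      rw [List.Perm.length_eq hperm, hsnil]; rfl
    exact List.eq_nil_of_length_eq_zero this
  rw [pv_scanB (group.length : Int) t.length t le_rfl hpw none (by simp) 0 total hpr]
  simp only [Option.isSome_none, Bool.false_and, Bool.false_eq_true, if_false, add_zero]
  congr 2
  have htf : t.toFinset = s.toFinset := List.toFinset_eq_of_perm t s hperm
  have hcnt : ∀ x, t.count x = s.count x := fun x => hperm.count_eq x
  rw [htf]
  congr 1
  apply Finset.filter_congr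
  intro x _
  rw [hcnt x]
  exact ⟨fun h => by exact_mod_cast h, fun h => by exact_mod_cast h⟩

-- the outer folds agree
lemma pv_outer (groups : List (List String)) : ∀ (acc : Int),
    groups.foldl (fun count group =>
      let answers := (PySem.Str.join "" group).toList
      (answers.foldl (fun st question =>
          if answers.count question == group.length && !(st.1.contains question) then
            (st.1 ++ [question], st.2 + 1)
          else st)
        (([] : List Char), count)).2) acc
    = groups.foldl (fun total group =>
      let n : Int := (group.length : Int)
      pvFin n ((PySem.List.sorted ((PySem.Str.join "" group).toList) (fun x => x) false).foldl
        (pvStepB n) (none, 0, total))) acc := by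
  induction groups with
  | nil => intro acc; rfl
  | cons g t ih =>
    intro acc
    simp only [List.foldl_cons]
    rw [ih]
    congr 1
    rw [pv_loopA ((PySem.Str.join "" g).toList) g.length ((PySem.Str.join "" g).toList) [] acc,
      pv_groupB]
    congr 2
    congr 1
    apply Finset.filter_congr
    intro x _
    simp

-- ===== VERDICT (by name: the statement is the Claim_ definition above) =====
theorem part_2_spec : Claim_equal_part_2 := by
  intro groups _
  unfold Spec_part_2 part_2 part_2_alt
  exact pv_outer groups 0
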